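-- pv_equiv track=rewrite | github.com/LoggeL/aoc-2025 | 02/solve.py | check_multi_sequence
-- ===== SOURCE A (Python) =====
-- def check_multi_sequence(num):
--     for seq_len in range(1, len(str(num)) // 2 + 1):
--         num_str = str(num)
--         num_check = num_str[:seq_len]
--         for i in range(seq_len, len(num_str), seq_len):
--             if num_str[i : i + seq_len] != num_check:
--                 break
--         else:
--             return True
-- ===== SOURCE B (Python) =====
-- def check_multi_sequence(num):
--     s = str(num)
--     n = len(s)
--     for k in range(2, n + 1):
--         if n % k == 0 and s == s[: n // k] * k:
--             return True
-- ===== Notes on version B (the rewrite author's own statement) =====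
-- stated objective: alternative
-- what changed: Instead of scanning every candidate period length up to half the string and comparing chunk by chunk in a nested loop, B enumerates the repetition count k, keeps only counts that divide the length, and tests s == s[:n//k] * k by building the candidate repetition once and comparing whole strings.
import Mathlib
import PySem

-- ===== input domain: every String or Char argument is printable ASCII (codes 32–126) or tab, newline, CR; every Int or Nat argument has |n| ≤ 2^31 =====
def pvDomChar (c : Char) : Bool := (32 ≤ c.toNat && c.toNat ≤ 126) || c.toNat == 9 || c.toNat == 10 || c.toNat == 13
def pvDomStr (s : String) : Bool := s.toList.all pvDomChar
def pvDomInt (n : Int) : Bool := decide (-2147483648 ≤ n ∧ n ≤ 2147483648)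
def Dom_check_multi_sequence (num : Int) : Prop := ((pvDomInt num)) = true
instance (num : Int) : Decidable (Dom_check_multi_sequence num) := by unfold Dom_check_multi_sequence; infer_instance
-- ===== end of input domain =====

-- B replaces A's nested period-length/chunk scanning with a loop over repetition counts
-- that filters by divisibility and compares s against s[:n//k]*k built once
-- (objective: alternative formulation; the return value is proved equal).

-- ===== PORT A =====
-- inner loop: 'for i in range(seq_len, len(num_str), seq_len): if num_str[i:i+seq_len] != num_check: break'
-- returns true exactly when the loop finishes without break (the for-else fires)
def pvInnerA (num_str num_check : List Char) (seq_len : Int) : List Int → Bool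
  | [] => true
  | i :: rest =>
    if PySem.List.slice num_str (some i) (some (i + seq_len)) ≠ num_check then false
    else pvInnerA num_str num_check seq_len rest

-- outer loop over seq_len; 'return True' on the for-else, falls through to None
def pvOuterA (num : Int) : List Int → Option Bool
  | [] => none
  | seq_len :: rest =>
    let num_str := PySem.Int.toChars num
    let num_check := PySem.List.slice num_str none (some seq_len)
    if pvInnerA num_str num_check seq_len
        (PySem.List.pyRange seq_len (num_str.length : Int) seq_len) = true
    then some true
    else pvOuterA num rest

def check_multi_sequence (num : Int) : Option Bool :=
  pvOuterA num
    (PySem.List.pyRange 1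
      (PySem.Int.floordiv ((PySem.Int.toChars num).length : Int) 2 + 1) 1)

-- ===== PORT B =====
-- string multiplication s[:d] * k
def pvRepeatB (block : List Char) : Nat → List Char
  | 0 => []
  | k + 1 => block ++ pvRepeatB block k

-- 'for k in range(2, n+1): if n % k == 0 and s == s[:n//k]*k: return True'
def pvLoopB (s : List Char) (n : Int) : List Int → Option Bool
  | [] => none
  | k :: rest =>
    if PySem.Int.mod n k = 0 ∧
        s = pvRepeatB (PySem.List.slice s none (some (PySem.Int.floordiv n k))) k.toNat
    then some true
    else pvLoopB s n rest

def check_multi_sequence_alt (num : Int) : Option Bool :=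
  let s := PySem.Int.toChars num
  let n : Int := (s.length : Int)
  pvLoopB s n (PySem.List.pyRange 2 (n + 1) 1)

-- ===== PRECONDITION & SPEC =====
def Spec_check_multi_sequence (num : Int) (out : Option Bool) : Prop := out = check_multi_sequence_alt num
instance (num : Int) (out : Option Bool) : Decidable (Spec_check_multi_sequence num out) := by unfold Spec_check_multi_sequence; infer_instance

-- ===== CLAIM (what is proved, stated in full; the proofs are below) =====
def Claim_equal_check_multi_sequence : Prop := ∀ (num : Int), Dom_check_multi_sequence num → Spec_check_multi_sequence num (check_multi_sequence num)

-- ===== LEMMAS AND PROOFS =====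

-- the outer loop of A is a first-success search
lemma pvOuterA_eq (num : Int) (L : List Int) :
    pvOuterA num L =
      if ∃ d ∈ L, pvInnerA (PySem.Int.toChars num)
          (PySem.List.slice (PySem.Int.toChars num) none (some d)) d
          (PySem.List.pyRange d ((PySem.Int.toChars num).length : Int) d) = true
      then some true else none := by
  induction L with
  | nil => simp [pvOuterA]
  | cons d rest ih =>
    show (if pvInnerA (PySem.Int.toChars num)
          (PySem.List.slice (PySem.Int.toChars num) none (some d)) d
          (PySem.List.pyRange d ((PySem.Int.toChars num).length : Int) d) = true
        then some true else pvOuterA num rest) = _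
    by_cases h : pvInnerA (PySem.Int.toChars num)
        (PySem.List.slice (PySem.Int.toChars num) none (some d)) d
        (PySem.List.pyRange d ((PySem.Int.toChars num).length : Int) d) = true
    · rw [if_pos h, if_pos ⟨d, List.mem_cons_self, h⟩]
    · rw [if_neg h, ih]
      by_cases h2 : ∃ d' ∈ rest, pvInnerA (PySem.Int.toChars num)
          (PySem.List.slice (PySem.Int.toChars num) none (some d')) d'
          (PySem.List.pyRange d' ((PySem.Int.toChars num).length : Int) d') = true
      · rcases h2 with ⟨d', hd', hp⟩
        rw [if_pos ⟨d', hd', hp⟩, if_pos ⟨d', List.mem_cons_of_mem d hd', hp⟩]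
      · rw [if_neg h2, if_neg ?_]
        rintro ⟨d', hd', hp⟩
        rcases List.mem_cons.1 hd' with rfl | hmem
        · exact h hp
        · exact h2 ⟨d', hmem, hp⟩

-- the loop of B is a first-success search
lemma pvLoopB_eq (s : List Char) (n : Int) (L : List Int) :
    pvLoopB s n L =
      if ∃ k ∈ L, PySem.Int.mod n k = 0 ∧
          s = pvRepeatB (PySem.List.slice s none (some (PySem.Int.floordiv n k))) k.toNat
      then some true else none := by
  induction L with
  | nil => simp [pvLoopB]
  | cons k rest ih =>
    show (if PySem.Int.mod n k = 0 ∧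
          s = pvRepeatB (PySem.List.slice s none (some (PySem.Int.floordiv n k))) k.toNat
        then some true else pvLoopB s n rest) = _
    by_cases h : PySem.Int.mod n k = 0 ∧
        s = pvRepeatB (PySem.List.slice s none (some (PySem.Int.floordiv n k))) k.toNat
    · rw [if_pos h, if_pos ⟨k, List.mem_cons_self, h⟩]
    · rw [if_neg h, ih]
      by_cases h2 : ∃ k' ∈ rest, PySem.Int.mod n k' = 0 ∧
          s = pvRepeatB (PySem.List.slice s none (some (PySem.Int.floordiv n k'))) k'.toNat
      · rcases h2 with ⟨k', hk', hp⟩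
        rw [if_pos ⟨k', hk', hp⟩, if_pos ⟨k', List.mem_cons_of_mem k hk', hp⟩]
      · rw [if_neg h2, if_neg ?_]
        rintro ⟨k', hk', hp⟩
        rcases List.mem_cons.1 hk' with rfl | hmem
        · exact h hp
        · exact h2 ⟨k', hmem, hp⟩

-- the inner loop of A succeeds iff every chunk it would inspect equals the prefix
lemma pvInnerA_iff (num_str num_check : List Char) (seq_len : Int) (L : List Int) :
    pvInnerA num_str num_check seq_len L = true ↔
      ∀ i ∈ L, PySem.List.slice num_str (some i) (some (i + seq_len)) = num_check := by
  induction L with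
  | nil => simp [pvInnerA]
  | cons i rest ih =>
    by_cases h : PySem.List.slice num_str (some i) (some (i + seq_len)) = num_check
    · simp [pvInnerA, h, ih]
    · simp [pvInnerA, h]

lemma pvRepeatB_drop (t : List Char) :
    ∀ (j m : Nat), j ≤ m → List.drop (j * t.length) (pvRepeatB t m) = pvRepeatB t (m - j) := by
  intro j
  induction j with
  | zero => intro m _; simp
  | succ j ih =>
    intro m hj
    cases m with
    | zero => omega
    | succ m' =>
      have h1 : (j + 1) * t.length = t.length + j * t.length := by ring
      rw [h1, ← List.drop_drop, pvRepeatB, List.drop_left]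
      have := ih m' (by omega)
      simpa using this

-- build the repetition from the chunk equalities (forward, after divisibility is known)
lemma pvRep_of_chunks (d : Nat) (hd : 0 < d) :
    ∀ (m : Nat) (l : List Char), l.length = d * m →
      (∀ j : Nat, 0 < j → j * d < l.length →
        List.take d (List.drop (j * d) l) = List.take d l) →
      l = pvRepeatB (List.take d l) m := by
  intro m
  induction m with
  | zero =>
    intro l hlen _
    have : l = [] := List.eq_nil_of_length_eq_zero (by omega)
    simp [this, pvRepeatB]
  | succ m ih =>
    intro l hlen hch
    have hdl : d ≤ l.length := by nlinarith
    rcases Nat.eq_zero_or_pos m with hm | hm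
    · subst hm
      have hld : l.length = d := by omega
      have ht : List.take d l = l := List.take_of_length_le (by omega)
      rw [ht]
      simp [pvRepeatB]
    · -- m ≥ 1
      have hdn : d < l.length := by nlinarith
      have hhead : List.take d (List.drop d l) = List.take d l := by
        have := hch 1 (by omega) (by omega)
        simpa using this
      have hlen' : (List.drop d l).length = d * m := by
        rw [List.length_drop, hlen, Nat.mul_succ]; omega
      have hch' : ∀ j : Nat, 0 < j → j * d < (List.drop d l).length →
          List.take d (List.drop (j * d) (List.drop d l)) = List.take d (List.drop d l) := by
        intro j hj hjd
        rw [List.drop_drop]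
        have h2 : d + j * d = (j + 1) * d := by ring
        rw [h2]
        have h3 : (j + 1) * d < l.length := by
          rw [List.length_drop] at hjd
          have := hjd
          have h4 : (j + 1) * d = j * d + d := by ring
          omega
        rw [hch (j + 1) (by omega) h3, hhead]
      have hrec := ih (List.drop d l) hlen' hch'
      rw [hhead] at hrec
      calc l = List.take d l ++ List.drop d l := (List.take_append_drop d l).symm
        _ = List.take d l ++ pvRepeatB (List.take d l) m := by rw [← hrec]
        _ = pvRepeatB (List.take d l) (m + 1) := rfl

-- the chunk equalities characterise "l is (take d l) repeated", Nat form
lemma pvChunks_iff (l : List Char) (d : Nat) (hd : 0 < d) (hdn : 2 * d ≤ l.length) :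
    (∀ j : Nat, 0 < j → j * d < l.length →
        List.take d (List.drop (j * d) l) = List.take d l)
    ↔ (d ∣ l.length ∧ l = pvRepeatB (List.take d l) (l.length / d)) := by
  constructor
  · intro hch
    have hdl : d ≤ l.length := by omega
    have hdvd : d ∣ l.length := by
      by_contra hnd
      have hmod : 0 < l.length % d := Nat.pos_of_ne_zero (fun h => hnd (Nat.dvd_of_mod_eq_zero h))
      have hmodlt : l.length % d < d := Nat.mod_lt _ hd
      have h2 : d * (l.length / d) + l.length % d = l.length := Nat.div_add_mod l.length d
      have hcomm : (l.length / d) * d = d * (l.length / d) := Nat.mul_comm _ _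
      have hq : 0 < l.length / d := Nat.div_pos hdl hd
      have hlt : (l.length / d) * d < l.length := by omega
      have heq := hch (l.length / d) hq hlt
      have hlen1 : (List.take d (List.drop ((l.length / d) * d) l)).length = l.length % d := by
        rw [List.length_take, List.length_drop]
        omega
      have hlen2 : (List.take d l).length = d := by
        rw [List.length_take]; omega
      rw [heq, hlen2] at hlen1
      omega
    refine ⟨hdvd, ?_⟩
    refine pvRep_of_chunks d hd (l.length / d) l ?_ hch
    rcases hdvd with ⟨m, hm⟩
    rw [hm, Nat.mul_div_cancel_left _ hd]
  · rintro ⟨hdvd, hrep⟩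
    intro j hj hjd
    have hdl : d ≤ l.length := by omega
    have htlen : (List.take d l).length = d := by rw [List.length_take]; omega
    rcases hdvd with ⟨m, hm⟩
    have hmd : l.length / d = m := by rw [hm, Nat.mul_div_cancel_left _ hd]
    have hjlt : j < m := by
      by_contra hc
      rw [Nat.not_lt] at hc
      have : m * d ≤ j * d := Nat.mul_le_mul_right d hc
      rw [hm] at hjd
      nlinarith
    have key : List.take d (List.drop (j * d) (pvRepeatB (List.take d l) (l.length / d)))
        = List.take d l := by
      rw [show j * d = j * (List.take d l).length by rw [htlen],
          pvRepeatB_drop _ j _ (by omega : j ≤ l.length / d)]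
      rcases Nat.exists_eq_add_of_lt (show j < l.length / d by omega) with ⟨r, hr⟩
      rw [show l.length / d - j = r + 1 by omega, pvRepeatB]
      exact List.take_left' htlen
    conv_lhs => rw [hrep]
    exact key

-- A's inner-loop success for period length d is exactly "d divides n and l is its prefix repeated"
lemma pvCondA_iff (l : List Char) (d : Int) (hd1 : 1 ≤ d) (hd2 : d * 2 ≤ (l.length : Int)) :
    (pvInnerA l (PySem.List.slice l none (some d)) d
        (PySem.List.pyRange d (l.length : Int) d) = true)
    ↔ (d.toNat ∣ l.length ∧ l = pvRepeatB (List.take d.toNat l) (l.length / d.toNat)) := by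
  have hd0 : (0:Int) ≤ d := by omega
  have hdn : ((d.toNat : Int)) = d := Int.toNat_of_nonneg hd0
  rw [pvInnerA_iff, PySem.List.slice_to l hd0,
    ← pvChunks_iff l d.toNat (by omega) (by omega)]
  constructor
  · intro hall j hj hlt
    have hmem : ((j * d.toNat : Nat) : Int) ∈ PySem.List.pyRange d (l.length:Int) d := by
      rw [PySem.List.mem_pyRange_iff_of_pos (by omega)]
      refine ⟨?_, by exact_mod_cast hlt, ⟨((j:Int) - 1), ?_⟩⟩
      · have h1 : d.toNat ≤ j * d.toNat := Nat.le_mul_of_pos_left _ hj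
        calc d = ((d.toNat : Nat) : Int) := hdn.symm
          _ ≤ _ := by exact_mod_cast h1
      · push_cast; rw [hdn]; ring
    have hsl := hall _ hmem
    rw [← hdn, PySem.List.slice_natCast_add] at hsl
    exact hsl
  · intro hch i hi
    rw [PySem.List.mem_pyRange_iff_of_pos (by omega)] at hi
    rcases hi with ⟨hdi, hiN, q, hq⟩
    have hq0 : 0 ≤ q := by nlinarith
    have hij : i = ((((q.toNat + 1) * d.toNat : Nat)) : Int) := by
      push_cast
      rw [Int.toNat_of_nonneg hq0, hdn]
      linarith [hq]
    have hlt : (q.toNat + 1) * d.toNat < l.length := by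
      rw [hij] at hiN; exact_mod_cast hiN
    have := hch (q.toNat + 1) (by omega) hlt
    rw [hij, ← hdn, PySem.List.slice_natCast_add]
    exact this

-- B's loop condition for count k is exactly "k divides n and l is its n/k-prefix repeated"
lemma pvCondB_iff (l : List Char) (k : Int) (hk2 : 2 ≤ k) :
    (PySem.Int.mod (l.length : Int) k = 0 ∧
      l = pvRepeatB (PySem.List.slice l none
        (some (PySem.Int.floordiv (l.length : Int) k))) k.toNat)
    ↔ (k.toNat ∣ l.length ∧ l = pvRepeatB (List.take (l.length / k.toNat) l) k.toNat) := by
  have hkn : ((k.toNat : Int)) = k := Int.toNat_of_nonneg (by omega)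
  conv_lhs => rw [← hkn]
  rw [PySem.Int.mod_eq_zero_iff_dvd, Int.natCast_dvd_natCast,
    PySem.Int.floordiv_natCast, PySem.List.slice_to l (by positivity), Int.toNat_natCast,
    Int.toNat_natCast]

-- divisor-length existential ↔ repetition-count existential
lemma pvBridge (l : List Char) :
    (∃ dn : Nat, 1 ≤ dn ∧ 2 * dn ≤ l.length ∧ dn ∣ l.length ∧
        l = pvRepeatB (List.take dn l) (l.length / dn))
    ↔ (∃ kn : Nat, 2 ≤ kn ∧ kn ≤ l.length ∧ kn ∣ l.length ∧
        l = pvRepeatB (List.take (l.length / kn) l) kn) := by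
  constructor
  · rintro ⟨dn, h1, h2, ⟨m, hm⟩, hrep⟩
    have hNd : l.length / dn = m := by rw [hm, Nat.mul_div_cancel_left _ h1]
    have hm2 : 2 ≤ m := by nlinarith
    have hNm : l.length / m = dn := by rw [hm, Nat.mul_div_cancel _ (by omega)]
    rw [hNd] at hrep
    refine ⟨m, hm2, ?_, ⟨dn, by rw [hm, Nat.mul_comm]⟩, ?_⟩
    · rw [hm]; exact Nat.le_mul_of_pos_left _ h1
    · rw [hNm]; exact hrep
  · rintro ⟨kn, h1, h2, ⟨dn, hm⟩, hrep⟩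
    have hk0 : 0 < kn := by omega
    have hNk : l.length / kn = dn := by rw [hm, Nat.mul_div_cancel_left _ hk0]
    have hd0 : 1 ≤ dn := by
      rcases Nat.eq_zero_or_pos dn with h | h
      · subst h; omega
      · exact h
    have hNd : l.length / dn = kn := by rw [hm, Nat.mul_div_cancel _ hd0]
    rw [hNk] at hrep
    refine ⟨dn, hd0, by nlinarith, ⟨kn, by rw [hm, Nat.mul_comm]⟩, ?_⟩
    rw [hNd]; exact hrep

-- ===== VERDICT (by name: the statement is the Claim_ definition above) =====
theorem check_multi_sequence_spec : Claim_equal_check_multi_sequence := by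
  intro num _
  show check_multi_sequence num = check_multi_sequence_alt num
  simp only [check_multi_sequence, check_multi_sequence_alt]
  rw [pvOuterA_eq, pvLoopB_eq]
  refine if_congr ?_ rfl rfl
  set l := PySem.Int.toChars num with hl
  constructor
  · rintro ⟨d, hmem, hA⟩
    rw [PySem.List.mem_pyRange_one] at hmem
    have hd2 : d * 2 ≤ (l.length : Int) := by
      have hle : d ≤ PySem.Int.floordiv (l.length : Int) 2 := by omega
      exact (PySem.Int.le_floordiv_iff_mul_le (by norm_num)).1 hle
    rw [pvCondA_iff l d hmem.1 hd2] at hA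
    have hex : ∃ dn : Nat, 1 ≤ dn ∧ 2 * dn ≤ l.length ∧ dn ∣ l.length ∧
        l = pvRepeatB (List.take dn l) (l.length / dn) :=
      ⟨d.toNat, by omega, by omega, hA.1, hA.2⟩
    rcases (pvBridge l).1 hex with ⟨kn, hk1, hk2, hdvd, hrep⟩
    refine ⟨(kn : Int), ?_, ?_⟩
    · rw [PySem.List.mem_pyRange_one]
      exact ⟨by exact_mod_cast hk1, by exact_mod_cast (by omega : kn < l.length + 1)⟩
    · rw [pvCondB_iff l (kn : Int) (by exact_mod_cast hk1), Int.toNat_natCast]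
      exact ⟨hdvd, hrep⟩
  · rintro ⟨k, hmem, hB⟩
    rw [PySem.List.mem_pyRange_one] at hmem
    rw [pvCondB_iff l k hmem.1] at hB
    have hex : ∃ kn : Nat, 2 ≤ kn ∧ kn ≤ l.length ∧ kn ∣ l.length ∧
        l = pvRepeatB (List.take (l.length / kn) l) kn :=
      ⟨k.toNat, by omega, by omega, hB.1, hB.2⟩
    rcases (pvBridge l).2 hex with ⟨dn, hd1, hd2, hdvd, hrep⟩
    refine ⟨(dn : Int), ?_, ?_⟩
    · rw [PySem.List.mem_pyRange_one]
      refine ⟨by exact_mod_cast hd1, ?_⟩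
      have : (dn : Int) ≤ PySem.Int.floordiv (l.length : Int) 2 := by
        rw [PySem.Int.le_floordiv_iff_mul_le (by norm_num)]
        exact_mod_cast (by omega : dn * 2 ≤ l.length)
      omega
    · rw [pvCondA_iff l (dn : Int) (by exact_mod_cast hd1)
        (by exact_mod_cast (by omega : dn * 2 ≤ l.length)), Int.toNat_natCast]
      exact ⟨hdvd, hrep⟩
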